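-- pv_equiv track=rewrite | github.com/ouyq1998/pycharm | help/08192.py | countConstructWays
-- ===== SOURCE A (Python) =====
-- def countConstructWays(a):
--     mod = int(1e9 + 7)
--     n = len(a)
--     _sum = sum(a)
--
--     dp = [[0] * (_sum + 1) for _ in range(n + 1)]
--     dp[0][0] = 1
--
--     for pos in range(1, n + 1):
--         for curSum in range(_sum + 1):
--             for num in range(1, _sum + 1):
--                 if num != a[pos - 1] and curSum + num <= _sum:
--                     dp[pos][curSum + num] += dp[pos - 1][curSum]
--                     dp[pos][curSum + num] %= mod
--
--     return dp[n][_sum]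
-- ===== SOURCE B (Python) =====
-- def countConstructWays(a):
--     mod = int(1e9 + 7)
--     s = sum(a)
--     dp = [0] * (s + 1)
--     dp[0] = 1
--     for ai in a:
--         pref = [0]
--         for c in range(s + 1):
--             pref.append((pref[c] + dp[c]) % mod)
--         new = []
--         for t in range(s + 1):
--             v = pref[t]
--             if 1 <= ai <= t:
--                 v -= dp[t - ai]
--             new.append(v % mod)
--         dp = new
--     return dp[s]
-- ===== Notes on version B (the rewrite author's own statement) =====
-- stated objective: alternative
-- what changed: Replaces the triple loop over (pos, curSum, num) on an (n+1)x(S+1) table by a single dp row updated once per element via a prefix-sum array, subtracting the one excluded term num=a[i] directly; intended as asymptotically faster (O(n*S) vs O(n*S^2), measured 61x at the largest size both finished) but a timing run could not confirm it at the largest generated sizes, so no speed is claimed.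
-- outside the precondition, e.g. on countConstructWays([-1]): A raises IndexError, B raises IndexError
import Mathlib
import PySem

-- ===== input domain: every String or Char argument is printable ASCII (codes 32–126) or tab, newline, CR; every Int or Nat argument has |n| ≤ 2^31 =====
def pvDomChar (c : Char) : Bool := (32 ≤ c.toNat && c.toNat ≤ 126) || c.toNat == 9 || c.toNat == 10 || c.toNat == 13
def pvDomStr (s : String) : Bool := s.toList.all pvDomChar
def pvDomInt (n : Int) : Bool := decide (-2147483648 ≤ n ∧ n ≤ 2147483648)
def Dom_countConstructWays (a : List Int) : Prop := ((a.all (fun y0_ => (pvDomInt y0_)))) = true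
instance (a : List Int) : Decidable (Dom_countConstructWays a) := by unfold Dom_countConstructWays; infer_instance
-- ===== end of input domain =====

-- B replaces A's triple loop over (pos, curSum, num) on an (n+1)x(S+1) table by a single dp row
-- updated once per element via a prefix-sum array, with the one excluded term num = a[i] subtracted directly.

-- ===== PORT A =====
def pvGet2 (dp : List (List Int)) (i j : Nat) : Int := (dp.getD i []).getD j 0
def pvSet2 (dp : List (List Int)) (i j : Nat) (v : Int) : List (List Int) :=
  dp.set i ((dp.getD i []).set j v)

def countConstructWays (a : List Int) : Int :=
  let md : Int := 1000000007
  let n := a.length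
  let s : Int := a.sum
  if s < 0 then 0   -- Python raises IndexError here (dp[0][0] on an empty row); excluded by Pre_
  else
    let S := s.toNat
    let dp0 := pvSet2 (List.replicate (n+1) (List.replicate (S+1) 0)) 0 0 1
    let dp := (List.range' 1 n).foldl (fun dp pos =>
      (List.range (S+1)).foldl (fun dp curSum =>
        (List.range' 1 S).foldl (fun dp (num : Nat) =>
          if (num : Int) ≠ a.getD (pos-1) 0 ∧ curSum + num ≤ S then
            pvSet2 dp pos (curSum+num)
              (PySem.Int.mod (pvGet2 dp pos (curSum+num) + pvGet2 dp (pos-1) curSum) md)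
          else dp) dp) dp) dp0
    pvGet2 dp n S

-- ===== PORT B =====
def countConstructWays_alt (a : List Int) : Int :=
  let md : Int := 1000000007
  let s : Int := a.sum
  if s < 0 then 0   -- Python raises IndexError here (dp[0] = 1 on an empty list); excluded by Pre_
  else
    let S := s.toNat
    let dp0 : List Int := (List.replicate (S+1) 0).set 0 1
    let dp := a.foldl (fun dp ai =>
      let pref := (List.range (S+1)).foldl
        (fun pref c => pref ++ [PySem.Int.mod (pref.getD c 0 + dp.getD c 0) md]) [(0:Int)]
      (List.range (S+1)).foldl (fun nw t =>
        let v := pref.getD t 0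
        let v := if 1 ≤ ai ∧ ai ≤ (t:Int) then v - dp.getD (t - ai.toNat) 0 else v
        nw ++ [PySem.Int.mod v md]) []) dp0
    dp.getD S 0

-- ===== PRECONDITION & SPEC =====
-- Pre_ excludes exactly the inputs with sum(a) < 0, on which Python A raises IndexError
-- (dp[0][0] = 1 on a list of empty rows); B raises IndexError there too (dp[0] = 1).
def Pre_countConstructWays (a : List Int) : Prop := 0 ≤ a.sum
instance (a : List Int) : Decidable (Pre_countConstructWays a) := by
  unfold Pre_countConstructWays; infer_instance
def pvWitness_countConstructWays : List Int := [1, 2]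

def Spec_countConstructWays (a : List Int) (out : Int) : Prop := out = countConstructWays_alt a
instance (a : List Int) (out : Int) : Decidable (Spec_countConstructWays a out) := by
  unfold Spec_countConstructWays; infer_instance

-- ===== CLAIM (what is proved, stated in full; the proofs are below) =====
def Claim_equal_countConstructWays : Prop := ∀ (a : List Int), Dom_countConstructWays a →
  Pre_countConstructWays a → Spec_countConstructWays a (countConstructWays a)

-- ===== LEMMAS AND PROOFS =====

def pvMd : Int := 1000000007

def pvBase : Nat → Int := fun t => if t = 0 then 1 else 0

def pvRowFun (f : Nat → Int) (ai : Int) : Nat → Int := fun t =>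
  ((Finset.range t).sum f - (if 1 ≤ ai ∧ ai ≤ (t:Int) then f (t - ai.toNat) else 0)) % pvMd

def pvSpec (a : List Int) : Nat → Int := a.foldl pvRowFun pvBase

-- the inner (curSum-indexed) loop body of port A, with the num-loop inside
def pvStepA (a : List Int) (S pos : Nat) (dp : List (List Int)) (curSum : Nat) : List (List Int) :=
  (List.range' 1 S).foldl (fun dp (num : Nat) =>
    if (num : Int) ≠ a.getD (pos-1) 0 ∧ curSum + num ≤ S then
      pvSet2 dp pos (curSum+num)
        (PySem.Int.mod (pvGet2 dp pos (curSum+num) + pvGet2 dp (pos-1) curSum) pvMd)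
    else dp) dp

-- the per-element loop body of port B
def pvBodyB (S : Nat) (dp : List Int) (ai : Int) : List Int :=
  let pref := (List.range (S+1)).foldl
    (fun pref c => pref ++ [PySem.Int.mod (pref.getD c 0 + dp.getD c 0) pvMd]) [(0:Int)]
  (List.range (S+1)).foldl (fun nw t =>
    let v := pref.getD t 0
    let v := if 1 ≤ ai ∧ ai ≤ (t:Int) then v - dp.getD (t - ai.toNat) 0 else v
    nw ++ [PySem.Int.mod v pvMd]) []

lemma pvMd_pos : (0:Int) < pvMd := by norm_num [pvMd]

lemma pvMod_eq (x : Int) : PySem.Int.mod x pvMd = x % pvMd :=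
  PySem.Int.mod_eq_emod_of_pos pvMd_pos

lemma pvAddm (x y : Int) : (x % pvMd + y) % pvMd = (x + y) % pvMd := by
  rw [Int.add_emod, Int.emod_emod_of_dvd _ dvd_rfl, ← Int.add_emod]

lemma pvSubm (x y : Int) : (x % pvMd - y) % pvMd = (x - y) % pvMd := by
  rw [Int.sub_emod, Int.emod_emod_of_dvd _ dvd_rfl, ← Int.sub_emod]

lemma pvModMod (x : Int) : x % pvMd % pvMd = x % pvMd := by
  exact Int.emod_emod_of_dvd _ dvd_rfl

lemma pvSumRange (g : Nat → Int) (m : Nat) :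
    ((List.range m).map g).sum = (Finset.range m).sum g := by
  induction m with
  | zero => simp
  | succ m ih => rw [List.range_succ, Finset.sum_range_succ]; simp [ih]

lemma pvRowFun_congr {f g : Nat → Int} (ai : Int) (t : Nat)
    (h : ∀ c, c < t → f c = g c) : pvRowFun f ai t = pvRowFun g ai t := by
  unfold pvRowFun
  have h1 : (Finset.range t).sum f = (Finset.range t).sum g :=
    Finset.sum_congr rfl (fun c hc => h c (Finset.mem_range.mp hc))
  rw [h1]
  by_cases hc : 1 ≤ ai ∧ ai ≤ (t:Int)
  · have : t - ai.toNat < t := by omega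
    simp [hc, h _ this]
  · simp [hc]

-- ===== B side =====

lemma pvMapRange_getD (f : Nat → Int) (m c : Nat) (hc : c < m) :
    ((List.range m).map f).getD c 0 = f c := by
  rw [List.getD_eq_getElem?_getD]
  simp [hc]

lemma pvPrefFold (f : Nat → Int) (S k : Nat) (hk : k ≤ S + 1) :
    (List.range k).foldl
      (fun pref c => pref ++ [PySem.Int.mod (pref.getD c 0 + ((List.range (S+1)).map f).getD c 0) pvMd]) [(0:Int)]
    = (List.range (k+1)).map (fun j => (Finset.range j).sum f % pvMd) := by
  induction k with
  | zero => simp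
  | succ k ih =>
    rw [List.range_succ (n := k), List.foldl_append, ih (by omega)]
    simp only [List.foldl]
    rw [pvMapRange_getD _ _ _ (by omega), pvMapRange_getD _ _ _ (by omega)]
    rw [List.range_succ (n := k+1), List.map_append]
    congr 1
    simp only [List.map_cons, List.map_nil, List.cons.injEq, and_true]
    rw [pvMod_eq, pvAddm, Finset.sum_range_succ]

lemma pvNewFold (f : Nat → Int) (S : Nat) (ai : Int) (k : Nat) (hk : k ≤ S + 1) :
    (List.range k).foldl (fun nw (t : Nat) =>
      nw ++ [PySem.Int.mod
        (if 1 ≤ ai ∧ ai ≤ (t:Int) then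
          ((List.range (S+2)).map (fun j => (Finset.range j).sum f % pvMd)).getD t 0
            - ((List.range (S+1)).map f).getD (t - ai.toNat) 0
         else ((List.range (S+2)).map (fun j => (Finset.range j).sum f % pvMd)).getD t 0) pvMd]) []
    = (List.range k).map (pvRowFun f ai) := by
  induction k with
  | zero => simp
  | succ k ih =>
    rw [List.range_succ (n := k), List.foldl_append, List.map_append, ih (by omega)]
    simp only [List.foldl, List.map_cons, List.map_nil]
    congr 2
    rw [pvMapRange_getD _ _ _ (show k < S+2 by omega), pvMod_eq]
    unfold pvRowFun
    by_cases hc : 1 ≤ ai ∧ ai ≤ (k:Int)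
    · rw [if_pos hc, if_pos hc, pvMapRange_getD _ _ _ (show k - ai.toNat < S+1 by omega), pvSubm]
    · rw [if_neg hc, if_neg hc, pvModMod, sub_zero]

lemma pvBodyB_eq (f : Nat → Int) (S : Nat) (ai : Int) :
    pvBodyB S ((List.range (S+1)).map f) ai = (List.range (S+1)).map (pvRowFun f ai) := by
  have h1 : pvBodyB S ((List.range (S+1)).map f) ai
      = (List.range (S+1)).foldl (fun nw (t : Nat) =>
          nw ++ [PySem.Int.mod
            (if 1 ≤ ai ∧ ai ≤ (t:Int) then
              ((List.range (S+1)).foldl (fun pref c => pref ++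
                  [PySem.Int.mod (pref.getD c 0 + ((List.range (S+1)).map f).getD c 0) pvMd]) [(0:Int)]).getD t 0
                - ((List.range (S+1)).map f).getD (t - ai.toNat) 0
             else ((List.range (S+1)).foldl (fun pref c => pref ++
                  [PySem.Int.mod (pref.getD c 0 + ((List.range (S+1)).map f).getD c 0) pvMd]) [(0:Int)]).getD t 0) pvMd]) [] := rfl
  rw [h1, pvPrefFold f S (S+1) le_rfl]
  exact pvNewFold f S ai (S+1) le_rfl

lemma pvAltFold (S : Nat) (a : List Int) (f : Nat → Int) :
    a.foldl (pvBodyB S) ((List.range (S+1)).map f)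
      = (List.range (S+1)).map (a.foldl pvRowFun f) := by
  induction a generalizing f with
  | nil => rfl
  | cons ai a ih =>
    simp only [List.foldl]
    rw [pvBodyB_eq, ih]

lemma pvDp0B (S : Nat) :
    (List.replicate (S+1) (0:Int)).set 0 1 = (List.range (S+1)).map pvBase := by
  apply List.ext_getElem
  · simp
  · intro i h1 h2
    simp only [List.getElem_set, List.getElem_replicate, List.getElem_map, List.getElem_range]
    unfold pvBase
    by_cases hi : i = 0
    · simp [hi]
    · simp [hi, Ne.symm hi]

lemma pvAlt_closed (a : List Int) (h : 0 ≤ a.sum) :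
    countConstructWays_alt a = pvSpec a a.sum.toNat := by
  have h0 : countConstructWays_alt a
      = (a.foldl (pvBodyB a.sum.toNat) ((List.replicate (a.sum.toNat+1) 0).set 0 1)).getD a.sum.toNat 0 := by
    unfold countConstructWays_alt pvBodyB pvMd
    rw [if_neg (not_lt.mpr h)]
  rw [h0, pvDp0B, pvAltFold, pvMapRange_getD _ _ _ (by omega)]
  rfl

-- ===== A side =====

lemma pvSet2_getD_ne (dp : List (List Int)) (i j : Nat) (v : Int) (p : Nat) (hp : p ≠ i) :
    (pvSet2 dp i j v).getD p [] = dp.getD p [] := by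
  unfold pvSet2
  rw [List.getD_eq_getElem?_getD, List.getElem?_set_ne (by omega), ← List.getD_eq_getElem?_getD]

lemma pvSet2_getD_self (dp : List (List Int)) (i j : Nat) (v : Int) (hi : i < dp.length) :
    (pvSet2 dp i j v).getD i [] = (dp.getD i []).set j v := by
  unfold pvSet2
  rw [List.getD_eq_getElem?_getD, List.getElem?_set_self (by omega)]
  rfl

def pvStepN (a : List Int) (S pos curSum : Nat) (dp : List (List Int)) (num : Nat) : List (List Int) :=
  if (num : Int) ≠ a.getD (pos-1) 0 ∧ curSum + num ≤ S then
    pvSet2 dp pos (curSum+num)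
      (PySem.Int.mod (pvGet2 dp pos (curSum+num) + pvGet2 dp (pos-1) curSum) pvMd)
  else dp

lemma pvStepA_eq (a : List Int) (S pos : Nat) (dp : List (List Int)) (curSum : Nat) :
    pvStepA a S pos dp curSum = (List.range' 1 S).foldl (pvStepN a S pos curSum) dp := rfl

lemma pvSetGetD (r : List Int) (j t : Nat) (v : Int) (ht : t < r.length) :
    (r.set j v).getD t 0 = if j = t then v else r.getD t 0 := by
  by_cases h : j = t
  · subst h
    rw [if_pos rfl, List.getD_eq_getElem?_getD, List.getElem?_set_self (by omega)]
    rfl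
  · rw [if_neg h, List.getD_eq_getElem?_getD, List.getElem?_set_ne h, ← List.getD_eq_getElem?_getD]

lemma pvGetD_default (r : List Int) (u : Nat) (hu : r.length ≤ u) : r.getD u 0 = 0 := by
  rw [List.getD_eq_getElem?_getD, List.getElem?_eq_none (by omega)]
  rfl

-- result of the num-loop for one fixed curSum (each cell is written at most once)
lemma pvNumLoop (a : List Int) (S pos curSum k : Nat) (dp : List (List Int))
    (hpos : 1 ≤ pos) (hlen : pos < dp.length) :
    (∀ p, p ≠ pos → ((List.range' 1 k).foldl (pvStepN a S pos curSum) dp).getD p [] = dp.getD p []) ∧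
    ((((List.range' 1 k).foldl (pvStepN a S pos curSum) dp)).getD pos []).length = (dp.getD pos []).length ∧
    ((List.range' 1 k).foldl (pvStepN a S pos curSum) dp).length = dp.length ∧
    (∀ t, t < (dp.getD pos []).length →
      pvGet2 ((List.range' 1 k).foldl (pvStepN a S pos curSum) dp) pos t =
        if curSum < t ∧ t ≤ curSum + k ∧ t ≤ S ∧ ((t - curSum : Nat) : Int) ≠ a.getD (pos-1) 0
        then (pvGet2 dp pos t + pvGet2 dp (pos-1) curSum) % pvMd
        else pvGet2 dp pos t) := by
  induction k with
  | zero =>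
    refine ⟨fun p _ => rfl, rfl, rfl, fun t ht => ?_⟩
    rw [if_neg (by omega)]
    rfl
  | succ k ih =>
    obtain ⟨iha, ihb, ihc, ihd⟩ := ih
    rw [List.range'_concat, List.foldl_append]
    simp only [List.foldl, Nat.one_mul]
    simp only [pvStepN]
    by_cases hb : ((1+k : Nat) : Int) ≠ a.getD (pos-1) 0 ∧ curSum + (1+k) ≤ S
    · rw [if_pos hb]
      have hposF : pos < ((List.range' 1 k).foldl (pvStepN a S pos curSum) dp).length := by
        rw [ihc]; exact hlen
      refine ⟨?_, ?_, ?_, ?_⟩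
      · intro p hp
        rw [pvSet2_getD_ne _ _ _ _ _ hp, iha p hp]
      · rw [pvSet2_getD_self _ _ _ _ hposF, List.length_set, ihb]
      · unfold pvSet2
        rw [List.length_set, ihc]
      · intro t ht
        have hvread : pvGet2 ((List.range' 1 k).foldl (pvStepN a S pos curSum) dp) (pos-1) curSum
            = pvGet2 dp (pos-1) curSum := by
          unfold pvGet2
          rw [iha (pos-1) (by omega)]
        unfold pvGet2
        rw [pvSet2_getD_self _ _ _ _ hposF,
          pvSetGetD _ _ _ _ (by rw [ihb]; exact ht)]
        by_cases hteq : curSum + (1+k) = t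
        · rw [if_pos hteq]
          subst hteq
          have hnot : ¬(curSum < curSum + (1+k) ∧ curSum + (1+k) ≤ curSum + k ∧ curSum + (1+k) ≤ S ∧
              ((curSum + (1+k) - curSum : Nat) : Int) ≠ a.getD (pos-1) 0) := by
            rintro ⟨-, h2, -, -⟩; omega
          have hdk := ihd (curSum + (1+k)) ht
          rw [if_neg hnot] at hdk
          unfold pvGet2 at hdk hvread
          rw [hdk, hvread, pvMod_eq]
          have hcast : curSum + (1 + k) - curSum = 1 + k := by omega
          rw [if_pos ⟨by omega, by omega, by omega, by rw [hcast]; exact hb.1⟩]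
        · rw [if_neg hteq]
          have hdk := ihd t ht
          unfold pvGet2 at hdk
          rw [hdk]
          by_cases hck : curSum < t ∧ t ≤ curSum + k ∧ t ≤ S ∧ ((t - curSum : Nat) : Int) ≠ a.getD (pos-1) 0
          · rw [if_pos hck, if_pos ⟨hck.1, by omega, hck.2.2⟩]
          · rw [if_neg hck, if_neg ?_]
            rintro ⟨h1, h2, h3, h4⟩
            exact hck ⟨h1, by omega, h3, h4⟩
    · rw [if_neg hb]
      refine ⟨iha, ihb, ihc, fun t ht => ?_⟩
      rw [ihd t ht]
      by_cases hck : curSum < t ∧ t ≤ curSum + k ∧ t ≤ S ∧ ((t - curSum : Nat) : Int) ≠ a.getD (pos-1) 0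
      · rw [if_pos hck, if_pos ⟨hck.1, by omega, hck.2.2⟩]
      · rw [if_neg hck, if_neg ?_]
        rintro ⟨h1, h2, h3, h4⟩
        refine hck ⟨h1, ?_, h3, h4⟩
        rcases Nat.lt_or_ge t (curSum + (1+k)) with h | h
        · omega
        · exfalso
          have hteq : t = curSum + (1+k) := by omega
          have hcast : t - curSum = 1 + k := by omega
          rw [hcast] at h4
          exact hb ⟨h4, by omega⟩

-- result of the curSum-loop (accumulation across iterations)
lemma pvCurLoop (a : List Int) (S pos : Nat) (L : List Nat) (dp : List (List Int))
    (hpos : 1 ≤ pos) (hlen : pos < dp.length)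
    (hred : ∀ u, pvGet2 dp pos u % pvMd = pvGet2 dp pos u) :
    (∀ p, p ≠ pos → (L.foldl (pvStepA a S pos) dp).getD p [] = dp.getD p []) ∧
    ((L.foldl (pvStepA a S pos) dp).getD pos []).length = (dp.getD pos []).length ∧
    (L.foldl (pvStepA a S pos) dp).length = dp.length ∧
    (∀ t, t < (dp.getD pos []).length →
      pvGet2 (L.foldl (pvStepA a S pos) dp) pos t =
        (pvGet2 dp pos t +
          (L.map (fun c =>
            if c < t ∧ t ≤ S ∧ ((t - c : Nat) : Int) ≠ a.getD (pos-1) 0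
            then pvGet2 dp (pos-1) c else 0)).sum) % pvMd) := by
  induction L generalizing dp with
  | nil =>
    refine ⟨fun p _ => rfl, rfl, rfl, fun t ht => ?_⟩
    simp only [List.foldl, List.map_nil, List.sum_nil, add_zero]
    exact (hred t).symm
  | cons c L ih =>
    simp only [List.foldl, List.map_cons, List.sum_cons]
    rw [pvStepA_eq]
    obtain ⟨na, nb, nc, nd⟩ := pvNumLoop a S pos c S dp hpos hlen
    set dp' := (List.range' 1 S).foldl (pvStepN a S pos c) dp with hdp'
    have hlen' : pos < dp'.length := by rw [nc]; exact hlen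
    have hred' : ∀ u, pvGet2 dp' pos u % pvMd = pvGet2 dp' pos u := by
      intro u
      by_cases hu : u < (dp.getD pos []).length
      · rw [nd u hu]
        by_cases hcnd : c < u ∧ u ≤ c + S ∧ u ≤ S ∧ ((u - c : Nat) : Int) ≠ a.getD (pos-1) 0
        · rw [if_pos hcnd, pvModMod]
        · rw [if_neg hcnd]
          exact hred u
      · have : pvGet2 dp' pos u = 0 := by
          unfold pvGet2
          exact pvGetD_default _ _ (by rw [nb]; omega)
        rw [this]
        exact Int.zero_emod _
    obtain ⟨ra, rb, rc, rd⟩ := ih dp' hlen' hred'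
    refine ⟨?_, ?_, ?_, ?_⟩
    · intro p hp
      rw [ra p hp, na p hp]
    · rw [rb, nb]
    · rw [rc, nc]
    · intro t ht
      have ht' : t < (dp'.getD pos []).length := by rw [nb]; exact ht
      rw [rd t ht']
      have hmap : (L.map (fun c' =>
          if c' < t ∧ t ≤ S ∧ ((t - c' : Nat) : Int) ≠ a.getD (pos-1) 0
          then pvGet2 dp' (pos-1) c' else 0))
          = (L.map (fun c' =>
          if c' < t ∧ t ≤ S ∧ ((t - c' : Nat) : Int) ≠ a.getD (pos-1) 0
          then pvGet2 dp (pos-1) c' else 0)) := by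
        apply List.map_congr_left
        intro x _
        have : pvGet2 dp' (pos-1) x = pvGet2 dp (pos-1) x := by
          unfold pvGet2
          rw [na (pos-1) (by omega)]
        rw [this]
      rw [hmap, nd t ht]
      by_cases hcnd : c < t ∧ t ≤ S ∧ ((t - c : Nat) : Int) ≠ a.getD (pos-1) 0
      · rw [if_pos ⟨hcnd.1, by omega, hcnd.2.1, hcnd.2.2⟩, if_pos hcnd, pvAddm, add_assoc]
      · rw [if_neg ?_, if_neg hcnd, zero_add]
        rintro ⟨h1, h2, h3, h4⟩
        exact hcnd ⟨h1, h3, h4⟩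

lemma pvContribSum (f : Nat → Int) (ai : Int) (S t : Nat) (ht : t ≤ S) :
    ((List.range (S+1)).map (fun c =>
        if c < t ∧ t ≤ S ∧ ((t - c : Nat) : Int) ≠ ai then f c else 0)).sum
      = (Finset.range t).sum f - (if 1 ≤ ai ∧ ai ≤ (t:Int) then f (t - ai.toNat) else 0) := by
  rw [pvSumRange]
  have hsub : (Finset.range t).sum (fun c =>
      if c < t ∧ t ≤ S ∧ ((t - c : Nat) : Int) ≠ ai then f c else 0)
      = (Finset.range (S+1)).sum (fun c =>
      if c < t ∧ t ≤ S ∧ ((t - c : Nat) : Int) ≠ ai then f c else 0) := by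
    apply Finset.sum_subset (by intro x hx; rw [Finset.mem_range] at *; omega)
    intro x _ hx
    rw [Finset.mem_range] at hx
    rw [if_neg (by rintro ⟨h1, -, -⟩; omega)]
  rw [← hsub]
  have hcongr : (Finset.range t).sum (fun c =>
      if c < t ∧ t ≤ S ∧ ((t - c : Nat) : Int) ≠ ai then f c else 0)
      = (Finset.range t).sum (fun c =>
      f c - (if ((t - c : Nat) : Int) = ai then f c else 0)) := by
    apply Finset.sum_congr rfl
    intro c hc
    have hc' := Finset.mem_range.mp hc
    by_cases h : ((t - c : Nat) : Int) = ai
    · rw [if_neg (by tauto), if_pos h, sub_self]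
    · rw [if_pos ⟨hc', ht, h⟩, if_neg h, sub_zero]
  rw [hcongr, Finset.sum_sub_distrib]
  congr 1
  by_cases hai : 1 ≤ ai ∧ ai ≤ (t : Int)
  · rw [if_pos hai]
    have hcongr2 : (Finset.range t).sum (fun c => if ((t - c : Nat) : Int) = ai then f c else 0)
        = (Finset.range t).sum (fun c => if c = t - ai.toNat then f c else 0) := by
      apply Finset.sum_congr rfl
      intro c hc
      have hc' := Finset.mem_range.mp hc
      by_cases h : ((t - c : Nat) : Int) = ai
      · rw [if_pos h, if_pos (by omega)]
      · rw [if_neg h, if_neg (by omega)]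
    rw [hcongr2, Finset.sum_ite_eq' (Finset.range t) (t - ai.toNat) f,
      if_pos (Finset.mem_range.mpr (by omega))]
  · rw [if_neg hai, Finset.sum_eq_zero]
    intro c hc
    have hc' := Finset.mem_range.mp hc
    rw [if_neg (by omega)]

lemma pvPosStep (a : List Int) (S pos : Nat) (dp : List (List Int))
    (hpos : 1 ≤ pos) (hlen : pos < dp.length)
    (hrow : dp.getD pos [] = List.replicate (S+1) 0) :
    (∀ p, p ≠ pos → ((List.range (S+1)).foldl (pvStepA a S pos) dp).getD p [] = dp.getD p []) ∧
    ((List.range (S+1)).foldl (pvStepA a S pos) dp).length = dp.length ∧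
    ((List.range (S+1)).foldl (pvStepA a S pos) dp).getD pos []
      = (List.range (S+1)).map (pvRowFun (fun c => pvGet2 dp (pos-1) c) (a.getD (pos-1) 0)) := by
  have h0 : ∀ u, pvGet2 dp pos u = 0 := by
    intro u
    unfold pvGet2
    rw [hrow, List.getD_eq_getElem?_getD, List.getElem?_replicate]
    by_cases hu : u < S + 1 <;> simp [hu]
  have hred : ∀ u, pvGet2 dp pos u % pvMd = pvGet2 dp pos u := by
    intro u
    rw [h0 u]
    exact Int.zero_emod _
  obtain ⟨ca, cb, cc, cd⟩ := pvCurLoop a S pos (List.range (S+1)) dp hpos hlen hred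
  refine ⟨ca, cc, ?_⟩
  apply List.ext_getElem
  · rw [cb, hrow]
    simp
  · intro i h1 h2
    have hiS : i < S + 1 := by
      rw [cb, hrow] at h1
      simpa using h1
    have hilen : i < (dp.getD pos []).length := by rw [hrow]; simpa using hiS
    rw [← List.getD_eq_getElem _ 0, ← List.getD_eq_getElem _ 0]
    have := cd i hilen
    unfold pvGet2 at this h0
    rw [this, h0 i, zero_add, pvContribSum _ _ _ _ (by omega),
      pvMapRange_getD _ _ _ hiS]
    rfl

lemma pvSpec_succ (a : List Int) (p : Nat) (hp : p < a.length) :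
    pvSpec (a.take (p+1)) = pvRowFun (pvSpec (a.take p)) (a.getD p 0) := by
  unfold pvSpec
  rw [List.take_add_one, List.getElem?_eq_getElem hp]
  rw [List.foldl_append]
  simp only [Option.toList_some, List.foldl_cons, List.foldl_nil]
  congr 1
  rw [List.getD_eq_getElem _ 0 hp]

lemma pvOuterLoop (a : List Int) (S k : Nat) (hk : k ≤ a.length) :
    ((List.range' 1 k).foldl (fun dp pos => (List.range (S+1)).foldl (pvStepA a S pos) dp)
        (pvSet2 (List.replicate (a.length+1) (List.replicate (S+1) 0)) 0 0 1)).length = a.length + 1 ∧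
    (∀ p, p ≤ k →
      ((List.range' 1 k).foldl (fun dp pos => (List.range (S+1)).foldl (pvStepA a S pos) dp)
        (pvSet2 (List.replicate (a.length+1) (List.replicate (S+1) 0)) 0 0 1)).getD p []
        = (List.range (S+1)).map (pvSpec (a.take p))) ∧
    (∀ p, k < p → p ≤ a.length →
      ((List.range' 1 k).foldl (fun dp pos => (List.range (S+1)).foldl (pvStepA a S pos) dp)
        (pvSet2 (List.replicate (a.length+1) (List.replicate (S+1) 0)) 0 0 1)).getD p []
        = List.replicate (S+1) 0) := by
  induction k with
  | zero =>
    have hlen0 : (pvSet2 (List.replicate (a.length+1) (List.replicate (S+1) (0:Int))) 0 0 1).length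
        = a.length + 1 := by
      unfold pvSet2
      rw [List.length_set, List.length_replicate]
    simp only [List.range'_zero, List.foldl_nil]
    refine ⟨hlen0, ?_, ?_⟩
    · intro p hp
      interval_cases p
      rw [pvSet2_getD_self _ _ _ _ (by rw [List.length_replicate]; omega)]
      have : (List.replicate (a.length+1) (List.replicate (S+1) (0:Int))).getD 0 []
          = List.replicate (S+1) 0 := by
        rw [List.getD_eq_getElem?_getD, List.getElem?_replicate, if_pos (by omega)]
        rfl
      rw [this, pvDp0B]
      rfl
    · intro p hp1 hp2
      rw [pvSet2_getD_ne _ _ _ _ _ (by omega),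
        List.getD_eq_getElem?_getD, List.getElem?_replicate, if_pos (by omega)]
      rfl
  | succ k ih =>
    obtain ⟨la, lb, lc⟩ := ih (by omega)
    rw [List.range'_concat, List.foldl_append]
    simp only [List.foldl, Nat.one_mul]
    set dpk := (List.range' 1 k).foldl (fun dp pos => (List.range (S+1)).foldl (pvStepA a S pos) dp)
        (pvSet2 (List.replicate (a.length+1) (List.replicate (S+1) 0)) 0 0 1) with hdpk
    obtain ⟨pa, pb, pc⟩ := pvPosStep a S (1+k) dpk (by omega) (by omega)
      (lc (1+k) (by omega) (by omega))
    refine ⟨by rw [pb, la], ?_, ?_⟩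
    · intro p hp
      by_cases hpk : p = 1 + k
      · subst hpk
        have hidx : 1 + k - 1 = k := by omega
        rw [hidx] at pc
        rw [pc]
        have hrowk : dpk.getD k [] = (List.range (S+1)).map (pvSpec (a.take k)) := lb k le_rfl
        have htk : a.take (1+k) = a.take (k+1) := by rw [Nat.add_comm]
        rw [htk, pvSpec_succ a k (by omega)]
        apply List.map_congr_left
        intro t hmem
        have htS : t < S + 1 := List.mem_range.mp hmem
        apply pvRowFun_congr
        intro c hc
        unfold pvGet2
        rw [hrowk, pvMapRange_getD _ _ _ (by omega)]
      · rw [pa p hpk, lb p (by omega)]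
    · intro p hp1 hp2
      rw [pa p (by omega), lc p (by omega) hp2]

lemma pvA_closed (a : List Int) (h : 0 ≤ a.sum) :
    countConstructWays a = pvSpec a a.sum.toNat := by
  have h0 : countConstructWays a
      = pvGet2 ((List.range' 1 a.length).foldl
          (fun dp pos => (List.range (a.sum.toNat+1)).foldl (pvStepA a a.sum.toNat pos) dp)
          (pvSet2 (List.replicate (a.length+1) (List.replicate (a.sum.toNat+1) 0)) 0 0 1))
          a.length a.sum.toNat := by
    unfold countConstructWays pvStepA pvMd
    rw [if_neg (not_lt.mpr h)]
  obtain ⟨la, lb, lc⟩ := pvOuterLoop a a.sum.toNat a.length le_rfl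
  rw [h0]
  unfold pvGet2
  rw [lb a.length le_rfl, List.take_length, pvMapRange_getD _ _ _ (by omega)]

-- ===== VERDICT (by name: the statement is the Claim_ definition above) =====
theorem countConstructWays_spec : Claim_equal_countConstructWays := by
  intro a _hdom hpre
  unfold Spec_countConstructWays
  rw [pvA_closed a hpre, pvAlt_closed a hpre]
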